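-- pv_equiv track=rewrite | github.com/rok92/backjoon | 프로그래머스/lv2/12973. 짝지어 제거하기/짝지어 제거하기.py | solution
-- ===== SOURCE A (Python) =====
-- def solution(s):
--     answer = []
--     for i in range(len(s)):
--         if not answer:
--             answer.append(s[i])
--         else:
--             if answer[-1] == s[i]:
--                 answer.pop()
--             else:
--                 answer.append(s[i])
--     if len(answer) == 0:
--         return 1
--     else:
--         return 0
-- ===== SOURCE B (Python) =====
-- def solution(s):
--     t = list(s)
--     while True:
--         for i in range(len(t) - 1):
--             if t[i] == t[i + 1]:
--                 del t[i:i + 2]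
--                 break
--         else:
--             break
--     return 1 if not t else 0
-- ===== Notes on version B (the rewrite author's own statement) =====
-- stated objective: alternative
-- what changed: Replaces the one-pass stack with a fixed-point reduction that repeatedly scans for the first adjacent equal pair, deletes it in place, and restarts until no pair remains.
import Mathlib
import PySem

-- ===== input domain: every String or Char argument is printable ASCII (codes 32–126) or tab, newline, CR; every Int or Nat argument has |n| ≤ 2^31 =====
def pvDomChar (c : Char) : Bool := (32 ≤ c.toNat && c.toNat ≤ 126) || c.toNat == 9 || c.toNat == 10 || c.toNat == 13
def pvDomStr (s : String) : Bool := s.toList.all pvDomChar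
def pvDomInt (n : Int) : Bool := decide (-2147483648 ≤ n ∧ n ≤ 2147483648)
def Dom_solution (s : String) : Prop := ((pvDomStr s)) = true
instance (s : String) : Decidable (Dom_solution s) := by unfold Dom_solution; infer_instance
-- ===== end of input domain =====

-- B is an alternative (not faster) implementation: instead of A's one-pass stack it
-- repeatedly deletes the first adjacent equal pair until none remains (fixed-point reduction).

-- ===== PORT A =====
-- loop body of A: append s[i] if the stack is empty or its top differs, else pop the top
def stepA (answer : List Char) (c : Char) : List Char :=
  if answer = [] then answer ++ [c]
  else if answer.getLast? = some c then answer.dropLast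
  else answer ++ [c]

def solution (s : String) : Int :=
  let answer := s.toList.foldl stepA []
  if answer.length = 0 then 1 else 0

-- ===== PORT B =====
-- Source B's inner for-loop: find the first index with t[i] == t[i+1] and delete the two
-- characters; 'none' means the for-loop fell through (no adjacent equal pair).
def removeFirstPair : List Char → Option (List Char)
  | a :: b :: t => if a = b then some t else (removeFirstPair (b :: t)).map (a :: ·)
  | _ => none

theorem removeFirstPair_length {l l' : List Char} (h : removeFirstPair l = some l') :
    l'.length + 2 = l.length := by
  induction l generalizing l' with
  | nil => simp [removeFirstPair] at h
  | cons x t ih =>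
    cases t with
    | nil => simp [removeFirstPair] at h
    | cons y t2 =>
      by_cases hxy : x = y
      · simp [removeFirstPair, hxy] at h
        subst h; simp
      · simp [removeFirstPair, hxy] at h
        obtain ⟨l'', h1, rfl⟩ := h
        have := ih h1
        simp at this ⊢
        omega

-- Source B's outer while-loop: keep deleting the first adjacent pair until none is found
def reduceAll (l : List Char) : List Char :=
  match h : removeFirstPair l with
  | some l' => reduceAll l'
  | none => l
termination_by l.length
decreasing_by
  have := removeFirstPair_length h; omega

def solution_alt (s : String) : Int :=
  if reduceAll s.toList = [] then 1 else 0

-- ===== PRECONDITION & SPEC =====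
def Spec_solution (s : String) (out : Int) : Prop := out = solution_alt s
instance (s : String) (out : Int) : Decidable (Spec_solution s out) := by unfold Spec_solution; infer_instance

-- ===== CLAIM (what is proved, stated in full; the proofs are below) =====
def Claim_equal_solution : Prop := ∀ (s : String), Dom_solution s → Spec_solution s (solution s)

-- ===== LEMMAS AND PROOFS =====

-- head-based mirror of A's stack step (the stack reversed, top at the head)
def stepR : List Char → Char → List Char
  | [], c => [c]
  | x :: t, c => if x = c then t else c :: x :: t

theorem stepA_eq (a : List Char) (c : Char) :
    stepA a c = (stepR a.reverse c).reverse := by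
  induction a using List.reverseRecOn with
  | nil => simp [stepA, stepR]
  | append_singleton ys x _ =>
    by_cases hxc : x = c <;>
      simp [stepA, stepR, hxc]

theorem foldl_stepA (l : List Char) (a : List Char) :
    l.foldl stepA a = (l.foldl stepR a.reverse).reverse := by
  induction l generalizing a with
  | nil => simp
  | cons c t ih =>
    simp only [List.foldl_cons, stepA_eq, ih, List.reverse_reverse]

-- invariant of A's stack: no two adjacent equal characters
def NoAdj (l : List Char) : Prop := l.IsChain (· ≠ ·)

theorem stepR_noAdj {a : List Char} {c : Char} (h : NoAdj a) : NoAdj (stepR a c) := by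
  cases a with
  | nil => simp [stepR, NoAdj]
  | cons x t =>
    by_cases hxc : x = c
    · simpa [stepR, hxc, NoAdj] using (List.isChain_cons.mp h).2
    · have hs : stepR (x :: t) c = c :: x :: t := by simp [stepR, hxc]
      rw [hs]
      exact List.isChain_cons_cons.mpr ⟨fun e => hxc e.symm, h⟩

theorem stepR_stepR {a : List Char} {b : Char} (h : NoAdj a) :
    stepR (stepR a b) b = a := by
  cases a with
  | nil => simp [stepR]
  | cons x t =>
    by_cases hxb : x = b
    · subst hxb
      cases t with
      | nil => simp [stepR]
      | cons y t2 =>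
        have hxy : x ≠ y := (List.isChain_cons_cons.mp h).1
        have hyx : ¬ (y = x) := fun e => hxy e.symm
        simp [stepR, hyx]
    · simp [stepR, hxb]

theorem foldl_removePair {l l' : List Char} (h : removeFirstPair l = some l')
    {a : List Char} (ha : NoAdj a) : l.foldl stepR a = l'.foldl stepR a := by
  induction l generalizing a l' with
  | nil => simp [removeFirstPair] at h
  | cons x t ih =>
    cases t with
    | nil => simp [removeFirstPair] at h
    | cons y t2 =>
      by_cases hxy : x = y
      · subst hxy
        simp [removeFirstPair] at h
        subst h
        simp only [List.foldl_cons]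
        rw [stepR_stepR ha]
      · simp [removeFirstPair, hxy] at h
        obtain ⟨l'', h1, rfl⟩ := h
        simp only [List.foldl_cons]
        exact ih h1 (stepR_noAdj ha)

theorem noAdj_of_none {l : List Char} (h : removeFirstPair l = none) : NoAdj l := by
  induction l with
  | nil => exact List.IsChain.nil
  | cons x t ih =>
    cases t with
    | nil => exact List.IsChain.singleton _
    | cons y t2 =>
      by_cases hxy : x = y
      · simp [removeFirstPair, hxy] at h
      · simp [removeFirstPair, hxy] at h
        exact List.isChain_cons_cons.mpr ⟨hxy, ih h⟩

theorem foldl_stepR_of_noAdj (t : List Char) (a : List Char)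
    (h : NoAdj (a.reverse ++ t)) : t.foldl stepR a = t.reverse ++ a := by
  induction t generalizing a with
  | nil => simp
  | cons c t' ih =>
    have hstep : stepR a c = c :: a := by
      cases a with
      | nil => simp [stepR]
      | cons x r =>
        have hxc : x ≠ c := by
          have := (List.isChain_append.mp h).2.2
          exact this x (by simp) c (by simp)
        simp [stepR, hxc]
    have h' : NoAdj ((c :: a).reverse ++ t') := by
      simpa [List.append_assoc] using h
    simp only [List.foldl_cons, hstep]
    rw [ih (c :: a) h']
    simp

theorem reduceAll_some {l l' : List Char} (h : removeFirstPair l = some l') :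
    reduceAll l = reduceAll l' := by
  rw [reduceAll]; split <;> simp_all

theorem reduceAll_none {l : List Char} (h : removeFirstPair l = none) :
    reduceAll l = l := by
  rw [reduceAll]; split <;> simp_all

theorem foldl_stepR_reduceAll (l : List Char) :
    l.foldl stepR [] = (reduceAll l).reverse := by
  induction l using reduceAll.induct with
  | case1 l l' h ih =>
    rw [foldl_removePair h (by simp [NoAdj]), ih, reduceAll_some h]
  | case2 l h =>
    rw [reduceAll_none h]
    simpa using foldl_stepR_of_noAdj l [] (by simpa [NoAdj] using noAdj_of_none h)

theorem solution_eq_alt (s : String) : solution s = solution_alt s := by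
  unfold solution solution_alt
  rw [foldl_stepA, List.reverse_nil, foldl_stepR_reduceAll, List.reverse_reverse]
  simp only [List.length_eq_zero_iff]

-- ===== VERDICT (by name: the statement is the Claim_ definition above) =====
theorem solution_spec : Claim_equal_solution := by
  intro s _
  unfold Spec_solution
  exact solution_eq_alt s
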